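-- pv_equiv track=rewrite | github.com/tobyqin/xmind2testlink | xmind2testlink/demo.py | loop
-- ===== SOURCE A (Python) =====
-- def loop(c, parent=None):
--     if c > 0:
--         return c, parent
--
--     if parent:
--         parent.append(c)
--     else:
--         parent = [c]
--
--     c = c + 1
--
--     return loop(c, parent)
-- ===== SOURCE B (Python) =====
-- def loop(c, parent=None):
--     if c > 0:
--         return c, parent
--     if parent:
--         parent.extend(range(c, 1))
--         return 1, parent
--     return 1, list(range(c, 1))
-- ===== Notes on version B (the rewrite author's own statement) =====
-- stated objective: simpler
-- what changed: Replaces the per-element recursive append with one non-recursive range(c,1) fill (extend a truthy parent in place, else build a fresh list); Pre_ excludes c < -9000, where A's one-stack-frame-per-step recursion overflows the interpreter's recursion limit and raises RecursionError (with CPython's default limit 1000 it already raises near c = -1000; c < -9000 raises for any limit up to 9000).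
import Mathlib
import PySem

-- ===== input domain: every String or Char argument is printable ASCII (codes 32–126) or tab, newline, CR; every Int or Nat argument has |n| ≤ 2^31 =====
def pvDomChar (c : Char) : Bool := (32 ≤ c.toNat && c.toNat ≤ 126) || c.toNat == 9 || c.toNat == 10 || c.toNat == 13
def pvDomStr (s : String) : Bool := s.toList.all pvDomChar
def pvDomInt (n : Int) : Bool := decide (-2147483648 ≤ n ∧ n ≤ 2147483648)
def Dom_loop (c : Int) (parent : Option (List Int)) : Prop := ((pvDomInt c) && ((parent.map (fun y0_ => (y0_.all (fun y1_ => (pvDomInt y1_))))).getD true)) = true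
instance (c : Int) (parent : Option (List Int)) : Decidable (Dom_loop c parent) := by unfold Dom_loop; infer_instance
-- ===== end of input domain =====

-- B replaces A's per-element recursion with one range(c,1) fill; both mutate a
-- truthy parent in place the same way (equivalence proved on return values).

-- ===== PORT A =====
-- literal transliteration of A: recursion with one append per step
def loop (c : Int) (parent : Option (List Int)) : Int × Option (List Int) :=
  if c > 0 then (c, parent)
  else
    -- `if parent:` — truthy iff parent is a non-empty list
    let p : List Int :=
      match parent with
      | some l => if l = [] then [c] else l ++ [c]
      | none => [c]
    loop (c + 1) (some p)
termination_by (1 - c).toNat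
decreasing_by omega

-- ===== PORT B =====
def loop_alt (c : Int) (parent : Option (List Int)) : Int × Option (List Int) :=
  if c > 0 then (c, parent)
  else
    match parent with
    | some l =>
      if l = [] then (1, some (PySem.List.pyRange c 1 1))
      else (1, some (l ++ PySem.List.pyRange c 1 1))
    | none => (1, some (PySem.List.pyRange c 1 1))

-- ===== PRECONDITION & SPEC =====
-- Pre_ excludes c < -9000, where A's one-stack-frame-per-step recursion overflows the
-- interpreter's recursion limit and raises RecursionError (with CPython's default limit
-- 1000 it already raises near c = -1000; c < -9000 raises for any limit up to 9000).
def Pre_loop (c : Int) (parent : Option (List Int)) : Prop := -9000 ≤ c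
instance (c : Int) (parent : Option (List Int)) : Decidable (Pre_loop c parent) := by unfold Pre_loop; infer_instance
def pvWitness_loop : Int × Option (List Int) := (-3, some [7])

def Spec_loop (c : Int) (parent : Option (List Int)) (out : Int × Option (List Int)) : Prop := out = loop_alt c parent
instance (c : Int) (parent : Option (List Int)) (out : Int × Option (List Int)) : Decidable (Spec_loop c parent out) := by unfold Spec_loop; infer_instance

-- ===== CLAIM (what is proved, stated in full; the proofs are below) =====
def Claim_equal_loop : Prop := ∀ (c : Int) (parent : Option (List Int)), Dom_loop c parent → Pre_loop c parent → Spec_loop c parent (loop c parent)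

-- ===== LEMMAS AND PROOFS =====

-- For c ≤ 1, A's recursion on some l yields (1, l ++ [c, …, 0]); the l = []
-- branch coincides since [] ++ pyRange c 1 1 = [c] ++ pyRange (c+1) 1 1.
theorem loop_some_eq (n : Nat) : ∀ (c : Int) (l : List Int), c ≤ 1 → (1 - c).toNat = n →
    loop c (some l) = (1, some (l ++ PySem.List.pyRange c 1 1)) := by
  induction n with
  | zero =>
    intro c l hc hn
    have hc1 : c = 1 := by omega
    subst hc1
    rw [loop.eq_def]
    simp [PySem.List.pyRange_one_eq_nil]
  | succ n ih =>
    intro c l hc hn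
    have hc0 : c ≤ 0 := by omega
    rw [loop.eq_def]
    simp only [if_neg (by omega : ¬ c > 0)]
    rw [PySem.List.pyRange_one_cons (by omega : c < 1)]
    by_cases hl : l = []
    · subst hl
      simp only [if_true, List.nil_append]
      rw [ih (c + 1) [c] (by omega) (by omega)]
      simp
    · simp only [if_neg hl]
      rw [ih (c + 1) (l ++ [c]) (by omega) (by omega)]
      simp

-- ===== VERDICT (by name: the statement is the Claim_ definition above) =====
theorem loop_spec : Claim_equal_loop := by
  intro c parent _ _
  unfold Spec_loop loop_alt
  by_cases hc : c > 0
  · rw [loop.eq_def]; simp [hc]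
  · replace hc : c ≤ 0 := by omega
    have hcons : (c :: PySem.List.pyRange (c + 1) 1 1) = PySem.List.pyRange c 1 1 :=
      (PySem.List.pyRange_one_cons (by omega : c < 1)).symm
    rw [loop.eq_def]
    simp only [if_neg (by omega : ¬ c > 0)]
    match parent with
    | none =>
      simp only
      rw [loop_some_eq (1 - (c + 1)).toNat (c + 1) [c] (by omega) rfl]
      simp [hcons]
    | some l =>
      by_cases hl : l = []
      · subst hl
        simp only [if_true]
        rw [loop_some_eq (1 - (c + 1)).toNat (c + 1) [c] (by omega) rfl]
        simp [hcons]
      · simp only [if_neg hl]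
        rw [loop_some_eq (1 - (c + 1)).toNat (c + 1) (l ++ [c]) (by omega) rfl]
        simp [hcons]
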